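-- pv_equiv track=rewrite | github.com/cortex359/advent-of-code | src/2023/day05/slicing_v3.py | slice_ranges
-- ===== SOURCE A (Python) =====
-- def slice_ranges(a: set[tuple[int, int]], b: set[tuple[int, int]]) -> set[tuple[int, int]]:
--     """slices a set of intervals into subintervals, such that all subintervals are either inside or outside every
--     interval in set b"""
--     tupels: tuple[int] = tuple()
--     for i in a.union(b):
--         tupels += i
--
--     sliced_boundaries: set[tuple[int, int]] = set()
--     boundary_list: list[int] = sorted(list(set(tupels)))
--
--     for i in range(len(boundary_list) - 1):
--         for s in a:
--             if s[0] <= boundary_list[i] < boundary_list[i + 1] <= s[1]: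
--                 sliced_boundaries.add((boundary_list[i], boundary_list[i + 1]))
--
--     return sliced_boundaries
-- ===== SOURCE B (Python) =====
-- def slice_ranges(a: set[tuple[int, int]], b: set[tuple[int, int]]) -> set[tuple[int, int]]:
--     """Sweep line: every endpoint is a boundary; a dict of +1/-1 coverage deltas
--     and one running-depth pass over the sorted boundaries replaces the inner scan of a."""
--     pts = sorted({x for t in a for x in t} | {x for t in b for x in t})
--     delta: dict[int, int] = {}
--     for s in a:
--         lo, hi = s[0], s[1]
--         if lo < hi:
--             delta[lo] = delta.get(lo, 0) + 1
--             delta[hi] = delta.get(hi, 0) - 1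
--     out: set[tuple[int, int]] = set()
--     depth = 0
--     for i in range(len(pts) - 1):
--         depth += delta.get(pts[i], 0)
--         if depth > 0:
--             out.add((pts[i], pts[i + 1]))
--     return out
-- ===== Notes on version B (the rewrite author's own statement) =====
-- stated objective: faster
-- what changed: Replaces A's inner scan of all a-intervals for every adjacent boundary pair by a sweep line: a dict of +1/-1 coverage deltas at interval endpoints and a single running-depth pass over the sorted boundaries.
-- outside the precondition, e.g. on slice_ranges({()}, {()}): A returns set(), B raises IndexError; on slice_ranges({(9,), (0, 5)}, set()): A returns {(0, 5)}, B raises IndexError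
import Mathlib
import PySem

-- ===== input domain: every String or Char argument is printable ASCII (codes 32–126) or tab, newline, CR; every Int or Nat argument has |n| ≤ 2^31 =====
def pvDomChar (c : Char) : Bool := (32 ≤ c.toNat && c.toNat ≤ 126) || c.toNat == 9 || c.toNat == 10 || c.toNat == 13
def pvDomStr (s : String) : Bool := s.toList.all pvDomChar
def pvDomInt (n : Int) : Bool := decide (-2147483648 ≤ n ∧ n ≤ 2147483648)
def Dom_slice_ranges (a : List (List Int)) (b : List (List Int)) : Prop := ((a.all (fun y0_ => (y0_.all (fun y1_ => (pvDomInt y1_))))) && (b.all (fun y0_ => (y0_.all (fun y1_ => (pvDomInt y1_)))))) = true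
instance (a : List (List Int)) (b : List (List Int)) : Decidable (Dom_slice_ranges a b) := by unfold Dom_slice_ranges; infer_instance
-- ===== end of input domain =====

-- B replaces A's inner scan of all a-intervals per adjacent boundary pair by a sweep line
-- (endpoint +1/-1 deltas in a dict, one running-depth pass over the sorted boundaries); measurably faster.

-- ===== PORT A =====
def slice_ranges (a : List (List Int)) (b : List (List Int)) : List (List Int) :=
  -- tupels += i over a.union(b) (set iteration feeds only sorted(set(...)), which is order-independent)
  let tupels : List Int :=
    (PySem.Set.union (PySem.Set.ofList a) b).foldl (fun acc i => acc ++ i) []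
  let boundary_list : List Int :=
    PySem.List.sorted (PySem.Set.ofList tupels) (fun x => x) false
  (PySem.List.pyRange 0 (PySem.List.len boundary_list - 1) 1).foldl
    (fun sliced i =>
      a.foldl (fun sliced s =>
        -- s[0] <= boundary_list[i] < boundary_list[i+1] <= s[1]
        match PySem.List.pyGet? s 0, PySem.List.pyGet? s 1 with
        | some s0, some s1 =>
          if s0 ≤ PySem.List.pyGetD boundary_list i 0 ∧
             PySem.List.pyGetD boundary_list i 0 < PySem.List.pyGetD boundary_list (i + 1) 0 ∧
             PySem.List.pyGetD boundary_list (i + 1) 0 ≤ s1 then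
            PySem.Set.add sliced [PySem.List.pyGetD boundary_list i 0,
                                  PySem.List.pyGetD boundary_list (i + 1) 0]
          else sliced
        | _, _ => sliced) sliced)
    (PySem.Set.empty : PySem.Set (List Int))

-- ===== PORT B =====
def slice_ranges_alt (a : List (List Int)) (b : List (List Int)) : List (List Int) :=
  let pts : List Int :=
    PySem.List.sorted
      (PySem.Set.union (PySem.Set.ofList (a.foldl (fun acc t => acc ++ t) []))
                       (PySem.Set.ofList (b.foldl (fun acc t => acc ++ t) [])))
      (fun x => x) false
  let delta : PySem.Dict Int Int :=
    a.foldl (fun d s =>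
      let lo := PySem.List.pyGetD s 0 0
      let hi := PySem.List.pyGetD s 1 0
      if lo < hi then
        let d1 := d.insert lo (d.getD lo 0 + 1)
        d1.insert hi (d1.getD hi 0 - 1)
      else d) PySem.Dict.empty
  let st :=
    (PySem.List.pyRange 0 (PySem.List.len pts - 1) 1).foldl
      (fun (st : PySem.Set (List Int) × Int) i =>
        let depth := st.2 + delta.getD (PySem.List.pyGetD pts i 0) 0
        (if 0 < depth then
           PySem.Set.add st.1 [PySem.List.pyGetD pts i 0, PySem.List.pyGetD pts (i + 1) 0]
         else st.1, depth))
      ((PySem.Set.empty : PySem.Set (List Int)), 0)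
  st.1

-- ===== PRECONDITION & SPEC =====
-- Pre_ excludes inputs where some element of a has fewer than two components: there A raises
-- IndexError at s[0]/s[1] except in degenerate cases where the chained comparison short-circuits
-- or the boundary list is too short to enter the loop (on those B raises instead of returning).
def Pre_slice_ranges (a : List (List Int)) (b : List (List Int)) : Prop :=
  ∀ s ∈ a, 2 ≤ s.length
instance (a : List (List Int)) (b : List (List Int)) : Decidable (Pre_slice_ranges a b) := by
  unfold Pre_slice_ranges; infer_instance

def pvWitness_slice_ranges : List (List Int) × List (List Int) :=
  ([[0, 5], [3, 9]], [[4, 6]])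

def Spec_slice_ranges (a : List (List Int)) (b : List (List Int)) (out : List (List Int)) : Prop := out = slice_ranges_alt a b
instance (a : List (List Int)) (b : List (List Int)) (out : List (List Int)) : Decidable (Spec_slice_ranges a b out) := by unfold Spec_slice_ranges; infer_instance

-- ===== CLAIM (what is proved, stated in full; the proofs are below) =====
def Claim_equal_slice_ranges : Prop := ∀ (a : List (List Int)) (b : List (List Int)), Dom_slice_ranges a b → Pre_slice_ranges a b → Spec_slice_ranges a b (slice_ranges a b)


-- ===== LEMMAS AND PROOFS =====

-- proof-side abbreviations: interval endpoints, delta contribution, coverage count, adjacent pairs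
def pvLo (s : List Int) : Int := s.getD 0 0
def pvHi (s : List Int) : Int := s.getD 1 0
def pvG (s : List Int) (v : Int) : Int :=
  (if pvLo s < pvHi s ∧ pvLo s = v then 1 else 0) - (if pvLo s < pvHi s ∧ pvHi s = v then 1 else 0)
def pvN (a : List (List Int)) (x : Int) : Int :=
  (a.map (fun s => if pvLo s ≤ x ∧ x < pvHi s then (1 : Int) else 0)).sum
def pvPairs (pts : List Int) : List (Int × Int) := pts.zip pts.tail
def pvPtsA (a b : List (List Int)) : List Int :=
  PySem.List.sorted
    (PySem.Set.ofList ((PySem.Set.union (PySem.Set.ofList a) b).foldl (fun acc i => acc ++ i) []))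
    (fun x => x) false
def pvPts (a b : List (List Int)) : List Int :=
  PySem.List.sorted
    (PySem.Set.union (PySem.Set.ofList (a.foldl (fun acc t => acc ++ t) []))
                     (PySem.Set.ofList (b.foldl (fun acc t => acc ++ t) [])))
    (fun x => x) false

theorem pvGet01 (s : List Int) (h : 2 ≤ s.length) :
    PySem.List.pyGet? s 0 = some (pvLo s) ∧ PySem.List.pyGet? s 1 = some (pvHi s) := by
  match s, h with
  | x0 :: x1 :: t, _ =>
    constructor
    · simp [PySem.List.pyGet?_zero_cons, pvLo]
    · rw [show (1:Int) = ((0:Nat):Int) + 1 by norm_num, PySem.List.pyGet?_cons_succ]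
      simp [pvHi]

theorem pv_delta_getD (a : List (List Int))
    (d : PySem.Dict Int Int) (v : Int) :
    (a.foldl (fun d s =>
      let lo := PySem.List.pyGetD s 0 0
      let hi := PySem.List.pyGetD s 1 0
      if lo < hi then
        let d1 := d.insert lo (d.getD lo 0 + 1)
        d1.insert hi (d1.getD hi 0 - 1)
      else d) d).getD v 0 = d.getD v 0 + (a.map (fun s => pvG s v)).sum := by
  induction a generalizing d with
  | nil => simp
  | cons s a ih =>
    have e0 : PySem.List.pyGetD s 0 0 = pvLo s := PySem.List.pyGetD_zero s 0
    have e1 : PySem.List.pyGetD s 1 0 = pvHi s := PySem.List.pyGetD_ofNat' s 1 0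
    simp only [List.foldl_cons, e0, e1, List.map_cons, List.sum_cons]
    rw [ih]
    by_cases hv : pvLo s < pvHi s
    · simp only [if_pos hv]
      have hne : pvLo s ≠ pvHi s := ne_of_lt hv
      by_cases h1 : v = pvHi s
      · subst h1
        rw [PySem.Dict.getD_insert_self]
        rw [PySem.Dict.getD_insert_of_ne (hne := Ne.symm hne)]
        simp only [pvG, hv, true_and]
        rw [if_neg hne, if_true]
        ring
      · rw [PySem.Dict.getD_insert_of_ne (hne := h1)]
        by_cases h2 : v = pvLo s
        · subst h2
          rw [PySem.Dict.getD_insert_self]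
          simp only [pvG, hv, true_and]
          rw [if_neg (Ne.symm hne), if_true]
          ring
        · rw [PySem.Dict.getD_insert_of_ne (hne := h2)]
          simp only [pvG, hv, true_and]
          rw [if_neg (fun h => h2 h.symm), if_neg (fun h => h1 h.symm)]
          ring
    · simp only [if_neg hv]
      simp [pvG, hv]

theorem pv_map_range_eq_pairs (pts : List Int) :
    (PySem.List.pyRange 0 (PySem.List.len pts - 1) 1).map
      (fun i => (PySem.List.pyGetD pts i 0, PySem.List.pyGetD pts (i + 1) 0)) = pvPairs pts := by
  rcases pts with _ | ⟨x, t⟩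
  · simp [PySem.List.pyRange_one_eq_nil, pvPairs, PySem.List.len]
  · have hlen : PySem.List.len (x :: t) - 1 = ((t.length : Nat) : Int) := by
      simp [PySem.List.len_eq]
    rw [hlen, PySem.List.pyRange_one]
    apply List.ext_getElem
    · simp [pvPairs]
    · intro k h1 h2
      simp only [List.getElem_map, List.getElem_range, pvPairs]
      have hk : k < t.length := by simpa using h1
      have e1 : PySem.List.pyGetD (x :: t) ((0:Int) + (k:Int)) 0 = (x :: t).getD k 0 := by
        rw [zero_add, PySem.List.pyGetD_natCast]
      have e2 : PySem.List.pyGetD (x :: t) ((0:Int) + (k:Int) + 1) 0 = (x :: t).getD (k+1) 0 := by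
        rw [zero_add, show ((k:Int) + 1) = (((k+1 : Nat)):Int) by push_cast; ring, PySem.List.pyGetD_natCast]
      rw [e1, e2]
      have hk1 : k < (x :: t).length := by simp; omega
      have hk2 : k + 1 < (x :: t).length := by simp; omega
      rw [List.getD_eq_getElem _ _ hk1, List.getD_eq_getElem _ _ hk2]
      simp [List.getElem_zip]

theorem pv_fold_exists_add {α : Type} (c : α → Prop) [DecidablePred c] (v : List Int)
    (l : List α) (sb : PySem.Set (List Int)) :
    l.foldl (fun sb s => if c s then PySem.Set.add sb v else sb) sb
      = if ∃ s ∈ l, c s then PySem.Set.add sb v else sb := by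
  induction l generalizing sb with
  | nil => simp
  | cons s l ih =>
    simp only [List.foldl_cons]
    by_cases h : c s
    · rw [if_pos h, ih]
      have hmem : v ∈ PySem.Set.add sb v := by
        rw [PySem.Set.mem_add]; right; rfl
      have hidem : PySem.Set.add (PySem.Set.add sb v) v = PySem.Set.add sb v :=
        PySem.Set.add_of_mem hmem
      have he : ∃ s' ∈ s :: l, c s' := ⟨s, by simp, h⟩
      rw [if_pos he]
      split_ifs with h2
      · exact hidem
      · rfl
    · rw [if_neg h, ih]
      by_cases h2 : ∃ s' ∈ l, c s'
      · rw [if_pos h2, if_pos (by obtain ⟨s', hs', hc⟩ := h2; exact ⟨s', by simp [hs'], hc⟩)]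
      · rw [if_neg h2, if_neg (by rintro ⟨s', hs', hc⟩; rcases List.mem_cons.mp hs' with rfl | hm
                                  exacts [h hc, h2 ⟨s', hm, hc⟩])]

theorem pv_fold_add_filter (c : Int × Int → Prop) [DecidablePred c]
    (q : List (Int × Int)) (out0 : PySem.Set (List Int))
    (hfresh : ∀ p ∈ q, [p.1, p.2] ∉ out0)
    (hnd : (q.map (fun p => [p.1, p.2])).Nodup) :
    q.foldl (fun acc p => if c p then PySem.Set.add acc [p.1, p.2] else acc) out0
      = out0 ++ (q.filter (fun p => decide (c p))).map (fun p => [p.1, p.2]) := by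
  induction q generalizing out0 with
  | nil => simp
  | cons p q ih =>
    simp only [List.foldl_cons, List.map_cons, List.nodup_cons] at *
    by_cases h : c p
    · rw [if_pos h, PySem.Set.add_of_not_mem (hfresh p (by simp))]
      rw [ih (out0 ++ [[p.1, p.2]]) ?_ hnd.2]
      · simp [h]
      · intro p' hp'
        simp only [List.mem_append, List.mem_singleton]
        rintro (hm | he)
        · exact hfresh p' (by simp [hp']) hm
        · exact hnd.1 (by rw [← he]; exact List.mem_map_of_mem hp')
    · rw [if_neg h, ih out0 (fun p' hp' => hfresh p' (by simp [hp'])) hnd.2]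
      simp [h]

theorem pv_sweep (D N : Int → Int) (q : List (Int × Int)) (out0 : PySem.Set (List Int)) (d0 : Int)
    (hchain : List.IsChain (fun p p' : Int × Int => p.2 = p'.1) q)
    (hhead : ∀ p, q.head? = some p → d0 + D p.1 = N p.1)
    (hstep : ∀ p ∈ q, N p.1 + D p.2 = N p.2)
    (hfresh : ∀ p ∈ q, [p.1, p.2] ∉ out0)
    (hnd : (q.map (fun p => [p.1, p.2])).Nodup) :
    (q.foldl (fun (st : PySem.Set (List Int) × Int) p =>
        let depth := st.2 + D p.1
        (if 0 < depth then PySem.Set.add st.1 [p.1, p.2] else st.1, depth)) (out0, d0)).1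
      = out0 ++ (q.filter (fun p => decide (0 < N p.1))).map (fun p => [p.1, p.2]) := by
  induction q generalizing out0 d0 with
  | nil => simp
  | cons p q ih =>
    simp only [List.foldl_cons, List.map_cons, List.nodup_cons] at *
    have hd : d0 + D p.1 = N p.1 := hhead p rfl
    rw [hd]
    have hout1 : (if 0 < N p.1 then PySem.Set.add out0 [p.1, p.2] else out0)
        = out0 ++ if 0 < N p.1 then [[p.1, p.2]] else [] := by
      split_ifs with h
      · exact PySem.Set.add_of_not_mem (hfresh p (by simp))
      · simp
    rw [hout1]
    rw [ih (out0 ++ if 0 < N p.1 then [[p.1, p.2]] else []) (N p.1) hchain.tail ?_ ?_ ?_ hnd.2]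
    · simp only [List.filter_cons, List.append_assoc]
      congr 1
      by_cases h : 0 < N p.1 <;> simp [h]
    · intro p' hp'
      cases q with
      | nil => simp at hp'
      | cons p2 q2 =>
        simp only [List.head?_cons, Option.some.injEq] at hp'
        have h12 : p.2 = p2.1 := hchain.rel_head
        rw [← hp', ← h12]
        exact hstep p (by simp)
    · exact fun p' hp' => hstep p' (by simp [hp'])
    · intro p' hp'
      simp only [List.mem_append]
      rintro (hm | he)
      · exact hfresh p' (by simp [hp']) hm
      · have : [p'.1, p'.2] = [p.1, p.2] := by
          split_ifs at he with h
          · simpa using he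
          · simp at he
        exact hnd.1 (by rw [← this]; exact List.mem_map_of_mem hp')

theorem pv_pts_eq (a b : List (List Int)) : pvPtsA a b = pvPts a b := by
  apply PySem.List.sorted_eq_sorted_of_perm _ _ _ (fun x y h => h)
  apply (List.perm_ext_iff_of_nodup (PySem.Set.nodup_ofList _)
    (PySem.Set.nodup_union _ _ (PySem.Set.nodup_ofList _))).mpr
  intro x
  rw [PySem.List.foldl_append_eq_flatten, PySem.List.foldl_append_eq_flatten,
      PySem.List.foldl_append_eq_flatten]
  simp only [PySem.Set.mem_ofList, PySem.Set.mem_union, List.nil_append, List.mem_flatten]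
  constructor
  · rintro ⟨t, ht, hx⟩
    rcases ht with h | h
    exacts [Or.inl ⟨t, h, hx⟩, Or.inr ⟨t, h, hx⟩]
  · rintro (⟨t, ht, hx⟩ | ⟨t, ht, hx⟩) <;> exact ⟨t, by tauto, hx⟩

theorem pv_pts_pairwise (a b : List (List Int)) : (pvPts a b).Pairwise (· < ·) := by
  rw [← pv_pts_eq]
  exact PySem.List.sorted_ofList_pairwise_lt _

theorem pv_mem_pts (a b : List (List Int)) (s : List Int) (hs : s ∈ a) (h : 2 ≤ s.length) :
    pvLo s ∈ pvPts a b ∧ pvHi s ∈ pvPts a b := by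
  have hmem : ∀ x ∈ s, x ∈ pvPts a b := by
    intro x hx
    unfold pvPts
    rw [PySem.List.mem_sorted, PySem.Set.mem_union, PySem.Set.mem_ofList,
        PySem.List.foldl_append_eq_flatten]
    exact Or.inl (by simp only [List.nil_append, List.mem_flatten]; exact ⟨s, hs, hx⟩)
  constructor
  · exact hmem _ (by unfold pvLo; rw [List.getD_eq_getElem _ _ (by omega)]; exact List.getElem_mem _)
  · exact hmem _ (by unfold pvHi; rw [List.getD_eq_getElem _ _ (by omega)]; exact List.getElem_mem _)

theorem pv_pairs_adj (pts : List Int) (hp : pts.Pairwise (· < ·)) (p : Int × Int)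
    (hq : p ∈ pvPairs pts) : p.1 < p.2 ∧ (∀ v ∈ pts, v ≤ p.1 ∨ p.2 ≤ v) := by
  obtain ⟨k, hk, hEq⟩ := List.mem_iff_getElem.mp hq
  have hkl : k + 1 < pts.length := by
    have := hk
    simp only [pvPairs, List.length_zip, List.length_tail] at this
    omega
  have h1 : p.1 = pts[k] := by
    rw [← hEq]; simp [pvPairs, List.getElem_zip]
  have h2 : p.2 = pts[k + 1]'hkl := by
    rw [← hEq]; simp [pvPairs, List.getElem_zip, List.getElem_tail]
  have hmono := List.pairwise_iff_getElem.mp hp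
  refine ⟨by rw [h1, h2]; exact hmono k (k+1) (by omega) hkl (by omega), ?_⟩
  intro v hv
  obtain ⟨j, hj, hvj⟩ := List.mem_iff_getElem.mp hv
  by_cases h : j ≤ k
  · left
    rw [h1, ← hvj]
    rcases Nat.eq_or_lt_of_le h with rfl | h
    · exact le_refl _
    · exact le_of_lt (hmono j k (by omega) (by omega) h)
  · right
    rw [h2, ← hvj]
    rcases Nat.eq_or_lt_of_le (by omega : k + 1 ≤ j) with heq | h'
    · subst heq; exact le_refl _
    · exact le_of_lt (hmono (k+1) j hkl hj h')

theorem pv_pairs_chain (pts : List Int) :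
    List.IsChain (fun p p' : Int × Int => p.2 = p'.1) (pvPairs pts) := by
  rw [List.isChain_iff_getElem]
  intro i hi
  have h1 : i + 1 < pts.length - 1 := by
    simpa [pvPairs, List.length_zip, List.length_tail] using hi
  simp [pvPairs, List.getElem_zip, List.getElem_tail]

theorem pv_pairs_nodup (pts : List Int) (hp : pts.Pairwise (· < ·)) :
    ((pvPairs pts).map (fun p => [p.1, p.2])).Nodup := by
  rw [List.nodup_iff_getElem?_ne_getElem?]
  intro i j hij hj
  have hj' : j < (pvPairs pts).length := by simpa using hj
  have hi' : i < (pvPairs pts).length := by omega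
  have hl : j + 1 < pts.length := by
    have := hj'
    simp only [pvPairs, List.length_zip, List.length_tail] at this
    omega
  have hmono := List.pairwise_iff_getElem.mp hp
  simp only [List.getElem?_eq_getElem, List.getElem_map,
    (by simpa using hi' : i < ((pvPairs pts).map (fun p => [p.1, p.2])).length), hj]
  intro h
  simp only [Option.some.injEq] at h
  have e1 : (pvPairs pts)[i].1 = pts[i]'(by omega) := by simp [pvPairs, List.getElem_zip]
  have e2 : (pvPairs pts)[j].1 = pts[j]'(by omega) := by simp [pvPairs, List.getElem_zip]
  have : (pvPairs pts)[i].1 = (pvPairs pts)[j].1 := by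
    have := congrArg (fun l => l.getD 0 0) h
    simpa using this
  rw [e1, e2] at this
  exact absurd this (ne_of_lt (hmono i j (by omega) (by omega) hij))

theorem pv_pairs_head (pts : List Int) (hp : pts.Pairwise (· < ·)) (p : Int × Int)
    (hh : (pvPairs pts).head? = some p) : ∀ v ∈ pts, p.1 ≤ v := by
  rcases pts with _ | ⟨x, t⟩
  · simp [pvPairs] at hh
  · rcases t with _ | ⟨y, t2⟩
    · simp [pvPairs] at hh
    · have hx : p.1 = x := by
        simp only [pvPairs, List.tail_cons, List.zip_cons_cons, List.head?_cons,
          Option.some.injEq] at hh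
        rw [← hh]
      intro v hv
      rw [hx]
      rcases List.mem_cons.mp hv with rfl | hm
      · exact le_refl _
      · exact le_of_lt (List.rel_of_pairwise_cons hp hm)

theorem pv_N_step (a : List (List Int)) (pts : List Int) (x y : Int)
    (hlen : ∀ s ∈ a, 2 ≤ s.length)
    (hmem : ∀ s ∈ a, pvLo s ∈ pts ∧ pvHi s ∈ pts)
    (hxy : x < y) (hgap : ∀ v ∈ pts, v ≤ x ∨ y ≤ v) :
    pvN a x + (a.map (fun s => pvG s y)).sum = pvN a y := by
  induction a with
  | nil => simp [pvN]
  | cons s a ih =>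
    have h1 := hmem s (by simp)
    have hgl := hgap _ h1.1
    have hgh := hgap _ h1.2
    have hpt : (if pvLo s ≤ x ∧ x < pvHi s then (1:Int) else 0) + pvG s y
        = (if pvLo s ≤ y ∧ y < pvHi s then (1:Int) else 0) := by
      unfold pvG
      split_ifs <;> omega
    simp only [pvN, List.map_cons, List.sum_cons] at *
    have ih' := ih (fun s hs => hlen s (by simp [hs])) (fun s hs => hmem s (by simp [hs]))
    linarith [hpt, ih']

theorem pv_N_head (a : List (List Int)) (pts : List Int) (x : Int)
    (hlen : ∀ s ∈ a, 2 ≤ s.length)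
    (hmem : ∀ s ∈ a, pvLo s ∈ pts ∧ pvHi s ∈ pts)
    (hmin : ∀ v ∈ pts, x ≤ v) :
    (a.map (fun s => pvG s x)).sum = pvN a x := by
  induction a with
  | nil => simp [pvN]
  | cons s a ih =>
    have h1 := hmem s (by simp)
    have hgl := hmin _ h1.1
    have hgh := hmin _ h1.2
    have hpt : pvG s x = (if pvLo s ≤ x ∧ x < pvHi s then (1:Int) else 0) := by
      unfold pvG
      split_ifs <;> omega
    simp only [pvN, List.map_cons, List.sum_cons] at *
    have ih' := ih (fun s hs => hlen s (by simp [hs])) (fun s hs => hmem s (by simp [hs]))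
    linarith [hpt, ih']

theorem pv_N_pos_iff (a : List (List Int)) (x : Int) :
    0 < pvN a x ↔ ∃ s ∈ a, pvLo s ≤ x ∧ x < pvHi s := by
  unfold pvN
  rw [show (fun s => if pvLo s ≤ x ∧ x < pvHi s then (1:Int) else 0)
      = (fun s => if (decide (pvLo s ≤ x ∧ x < pvHi s) : Bool) = true then (1:Int) else 0) by
    funext s; by_cases h : pvLo s ≤ x ∧ x < pvHi s <;> simp [h]]
  rw [PySem.List.sum_map_ite_one_zero]
  rw [show (0:Int) < (List.countP (fun s => decide (pvLo s ≤ x ∧ x < pvHi s)) a : Int)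
      ↔ 0 < List.countP (fun s => decide (pvLo s ≤ x ∧ x < pvHi s)) a by exact_mod_cast Iff.rfl]
  rw [List.countP_pos_iff]
  simp

theorem pv_cond_iff (a : List (List Int)) (pts : List Int) (x y : Int)
    (hmem : ∀ s ∈ a, pvLo s ∈ pts ∧ pvHi s ∈ pts)
    (hxy : x < y) (hgap : ∀ v ∈ pts, v ≤ x ∨ y ≤ v) :
    (∃ s ∈ a, pvLo s ≤ x ∧ x < y ∧ y ≤ pvHi s) ↔ 0 < pvN a x := by
  rw [pv_N_pos_iff]
  constructor
  · rintro ⟨s, hs, h1, h2, h3⟩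
    exact ⟨s, hs, h1, by omega⟩
  · rintro ⟨s, hs, h1, h2⟩
    have hh := (hmem s hs).2
    rcases hgap _ hh with h | h
    · omega
    · exact ⟨s, hs, h1, hxy, h⟩

-- the two loop phases of the ports, abstracted over the boundary list
def pvAloop (a : List (List Int)) (pts : List Int) : List (List Int) :=
  (PySem.List.pyRange 0 (PySem.List.len pts - 1) 1).foldl
    (fun sliced i =>
      a.foldl (fun sliced s =>
        match PySem.List.pyGet? s 0, PySem.List.pyGet? s 1 with
        | some s0, some s1 =>
          if s0 ≤ PySem.List.pyGetD pts i 0 ∧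
             PySem.List.pyGetD pts i 0 < PySem.List.pyGetD pts (i + 1) 0 ∧
             PySem.List.pyGetD pts (i + 1) 0 ≤ s1 then
            PySem.Set.add sliced [PySem.List.pyGetD pts i 0, PySem.List.pyGetD pts (i + 1) 0]
          else sliced
        | _, _ => sliced) sliced)
    (PySem.Set.empty : PySem.Set (List Int))

def pvDelta (a : List (List Int)) : PySem.Dict Int Int :=
  a.foldl (fun d s =>
    let lo := PySem.List.pyGetD s 0 0
    let hi := PySem.List.pyGetD s 1 0
    if lo < hi then
      let d1 := d.insert lo (d.getD lo 0 + 1)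
      d1.insert hi (d1.getD hi 0 - 1)
    else d) PySem.Dict.empty

def pvBloop (a : List (List Int)) (pts : List Int) : List (List Int) :=
  ((PySem.List.pyRange 0 (PySem.List.len pts - 1) 1).foldl
    (fun (st : PySem.Set (List Int) × Int) i =>
      let depth := st.2 + (pvDelta a).getD (PySem.List.pyGetD pts i 0) 0
      (if 0 < depth then
         PySem.Set.add st.1 [PySem.List.pyGetD pts i 0, PySem.List.pyGetD pts (i + 1) 0]
       else st.1, depth))
    ((PySem.Set.empty : PySem.Set (List Int)), 0)).1

theorem pv_A_eq (a b : List (List Int)) : slice_ranges a b = pvAloop a (pvPtsA a b) := rfl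
theorem pv_B_eq (a b : List (List Int)) : slice_ranges_alt a b = pvBloop a (pvPts a b) := rfl

theorem pv_loops_eq (a : List (List Int)) (pts : List Int)
    (hlen : ∀ s ∈ a, 2 ≤ s.length)
    (hp : pts.Pairwise (· < ·))
    (hmem : ∀ s ∈ a, pvLo s ∈ pts ∧ pvHi s ∈ pts) :
    pvAloop a pts = pvBloop a pts := by
  have hD : ∀ v, (pvDelta a).getD v 0 = (a.map (fun s => pvG s v)).sum := by
    intro v
    unfold pvDelta
    rw [pv_delta_getD a]
    rw [PySem.Dict.getD_empty, zero_add]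
  have hA : pvAloop a pts
      = (pvPairs pts).foldl
          (fun sb p =>
            a.foldl (fun sliced s =>
              match PySem.List.pyGet? s 0, PySem.List.pyGet? s 1 with
              | some s0, some s1 =>
                if s0 ≤ p.1 ∧ p.1 < p.2 ∧ p.2 ≤ s1 then
                  PySem.Set.add sliced [p.1, p.2]
                else sliced
              | _, _ => sliced) sb)
          (PySem.Set.empty : PySem.Set (List Int)) := by
    rw [← pv_map_range_eq_pairs pts, List.foldl_map]
    rfl
  have hB : pvBloop a pts
      = ((pvPairs pts).foldl
          (fun (st : PySem.Set (List Int) × Int) p =>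
            let depth := st.2 + (pvDelta a).getD p.1 0
            (if 0 < depth then PySem.Set.add st.1 [p.1, p.2] else st.1, depth))
          ((PySem.Set.empty : PySem.Set (List Int)), 0)).1 := by
    unfold pvBloop
    rw [← pv_map_range_eq_pairs pts, List.foldl_map]
  rw [hA, hB]
  have hcongr : (pvPairs pts).foldl
      (fun sb p =>
        a.foldl (fun sliced s =>
          match PySem.List.pyGet? s 0, PySem.List.pyGet? s 1 with
          | some s0, some s1 =>
            if s0 ≤ p.1 ∧ p.1 < p.2 ∧ p.2 ≤ s1 then PySem.Set.add sliced [p.1, p.2] else sliced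
          | _, _ => sliced) sb)
      (PySem.Set.empty : PySem.Set (List Int))
      = (pvPairs pts).foldl
        (fun sb (p : Int × Int) => if 0 < pvN a p.1 then PySem.Set.add sb [p.1, p.2] else sb)
        (PySem.Set.empty : PySem.Set (List Int)) := by
    apply PySem.List.foldl_congr_mem
    intro sb p hq
    obtain ⟨hxy, hgap⟩ := pv_pairs_adj pts hp p hq
    have hinner : a.foldl (fun sliced s =>
        match PySem.List.pyGet? s 0, PySem.List.pyGet? s 1 with
        | some s0, some s1 =>
          if s0 ≤ p.1 ∧ p.1 < p.2 ∧ p.2 ≤ s1 then PySem.Set.add sliced [p.1, p.2] else sliced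
        | _, _ => sliced) sb
        = a.foldl (fun sliced s =>
          if pvLo s ≤ p.1 ∧ p.1 < p.2 ∧ p.2 ≤ pvHi s then PySem.Set.add sliced [p.1, p.2]
          else sliced) sb := by
      apply PySem.List.foldl_congr_mem
      intro acc s hs
      have h01 := pvGet01 s (hlen s hs)
      rw [h01.1, h01.2]
    rw [hinner,
        pv_fold_exists_add (fun s => pvLo s ≤ p.1 ∧ p.1 < p.2 ∧ p.2 ≤ pvHi s) [p.1, p.2] a sb,
        if_congr (pv_cond_iff a pts p.1 p.2 hmem hxy hgap) rfl rfl]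
  rw [hcongr]
  rw [pv_fold_add_filter (fun p : Int × Int => 0 < pvN a p.1) (pvPairs pts) PySem.Set.empty
        (by intro p hp'; exact List.not_mem_nil) (pv_pairs_nodup pts hp)]
  rw [pv_sweep (fun v => (pvDelta a).getD v 0) (pvN a) (pvPairs pts) PySem.Set.empty 0
        (pv_pairs_chain pts)
        (by
          intro p hh
          show 0 + (pvDelta a).getD p.1 0 = pvN a p.1
          rw [zero_add, hD]
          exact pv_N_head a pts p.1 hlen hmem (pv_pairs_head pts hp p hh))
        (by
          intro p hq
          obtain ⟨hxy, hgap⟩ := pv_pairs_adj pts hp p hq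
          show pvN a p.1 + (pvDelta a).getD p.2 0 = pvN a p.2
          rw [hD]
          exact pv_N_step a pts p.1 p.2 hlen hmem hxy hgap)
        (by intro p hp'; exact List.not_mem_nil)
        (pv_pairs_nodup pts hp)]

-- ===== VERDICT (by name: the statement is the Claim_ definition above) =====
theorem slice_ranges_spec : Claim_equal_slice_ranges := by
  intro a b _hdom hpre
  unfold Spec_slice_ranges
  rw [pv_A_eq, pv_B_eq, pv_pts_eq]
  exact pv_loops_eq a (pvPts a b) hpre (pv_pts_pairwise a b)
    (fun s hs => pv_mem_pts a b s hs (hpre s hs))
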